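-- pv_equiv track=rewrite | github.com/ThomasFunk/SimpleWx | tools/swx-builder/swx-builder.py | _map_qt_icon_to_simplewx_icon
-- ===== SOURCE A (Python) =====
-- from typing import Any, Dict, List, Optional, Tuple
--
-- def _map_qt_icon_to_simplewx_icon(icon_name: str) -> Optional[str]:
--     normalized = icon_name.strip()
--     if "::" in normalized:
--         normalized = normalized.split("::")[-1]
--
--     if normalized and any(ch.isupper() for ch in normalized):
--         parts: List[str] = []
--         for index, char in enumerate(normalized):
--             if index > 0 and char.isupper() and (
--                 normalized[index - 1].islower()
--                 or (index + 1 < len(normalized) and normalized[index + 1].islower())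
--             ):
--                 parts.append("-")
--             parts.append(char.lower())
--         normalized = "".join(parts)
--
--     normalized = normalized.replace("_", "-").strip().lower()
--     if not normalized:
--         return None
--
--     icon_map = {
--         "document-open": "gtk-open",
--         "document-save": "gtk-save",
--         "document-save-as": "gtk-save-as",
--         "document-new": "gtk-new",
--         "edit-copy": "gtk-copy",
--         "edit-cut": "gtk-cut",
--         "edit-paste": "gtk-paste",
--         "edit-delete": "gtk-delete",
--         "application-exit": "gtk-quit",
--         "help-browser": "gtk-help",
--         "edit-find": "gtk-find",
--         "go-home": "gtk-home",
--         "go-previous": "gtk-go-back",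
--         "go-next": "gtk-go-forward",
--         "view-refresh": "gtk-refresh",
--         "edit-undo": "gtk-undo",
--         "dialog-information": "gtk-info",
--         "dialog-warning": "gtk-warning",
--         "dialog-error": "gtk-error",
--     }
--     return icon_map.get(normalized, normalized)
-- ===== SOURCE B (Python) =====
-- import re
-- from typing import Optional
--
-- # hyphen goes where an ASCII uppercase follows a lowercase, or where an
-- # uppercase with a lowercase right after it follows any character
-- _BOUNDARY = re.compile(r"(?<=[a-z])(?=[A-Z])|(?<=[\s\S])(?=[A-Z][a-z])")
--
-- _ICON_MAP = {
--     "document-open": "gtk-open",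
--     "document-save": "gtk-save",
--     "document-save-as": "gtk-save-as",
--     "document-new": "gtk-new",
--     "edit-copy": "gtk-copy",
--     "edit-cut": "gtk-cut",
--     "edit-paste": "gtk-paste",
--     "edit-delete": "gtk-delete",
--     "application-exit": "gtk-quit",
--     "help-browser": "gtk-help",
--     "edit-find": "gtk-find",
--     "go-home": "gtk-home",
--     "go-previous": "gtk-go-back",
--     "go-next": "gtk-go-forward",
--     "view-refresh": "gtk-refresh",
--     "edit-undo": "gtk-undo",
--     "dialog-information": "gtk-info",
--     "dialog-warning": "gtk-warning",
--     "dialog-error": "gtk-error",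
-- }
--
-- def _map_qt_icon_to_simplewx_icon(icon_name: str) -> Optional[str]:
--     name = icon_name.strip().split("::")[-1]
--     name = _BOUNDARY.sub("-", name).replace("_", "-").strip().lower()
--     if not name:
--         return None
--     return _ICON_MAP.get(name, name)
-- ===== Notes on version B (the rewrite author's own statement) =====
-- stated objective: idiomatic
-- what changed: The explicit index-based CamelCase loop (with its emptiness/any-uppercase guard and per-character lowercasing) is replaced by a single precompiled regex zero-width boundary substitution followed by an unconditional split/replace/strip/lower pipeline.
import Mathlib
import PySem

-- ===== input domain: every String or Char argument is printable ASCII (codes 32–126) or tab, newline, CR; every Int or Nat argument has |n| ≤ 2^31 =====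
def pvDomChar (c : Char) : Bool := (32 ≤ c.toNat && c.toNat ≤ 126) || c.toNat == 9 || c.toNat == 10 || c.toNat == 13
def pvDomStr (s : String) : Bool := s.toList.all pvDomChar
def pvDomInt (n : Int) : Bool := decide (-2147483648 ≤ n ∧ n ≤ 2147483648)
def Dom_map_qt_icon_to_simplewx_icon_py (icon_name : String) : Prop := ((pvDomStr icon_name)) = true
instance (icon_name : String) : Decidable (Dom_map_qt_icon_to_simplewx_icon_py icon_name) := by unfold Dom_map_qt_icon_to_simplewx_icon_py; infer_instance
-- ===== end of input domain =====

-- B replaces A's index-based CamelCase loop by a single regex boundary substitution and an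
-- unconditional split/lower pipeline (objective: idiomatic; return value only, no mutation).

-- the icon_map dict literal, shared verbatim by both Pythons
def pvIconMap : PySem.Dict String String :=
  ((((((((((((((((((PySem.Dict.empty.insert "document-open" "gtk-open").insert
    "document-save" "gtk-save").insert
    "document-save-as" "gtk-save-as").insert
    "document-new" "gtk-new").insert
    "edit-copy" "gtk-copy").insert
    "edit-cut" "gtk-cut").insert
    "edit-paste" "gtk-paste").insert
    "edit-delete" "gtk-delete").insert
    "application-exit" "gtk-quit").insert
    "help-browser" "gtk-help").insert
    "edit-find" "gtk-find").insert
    "go-home" "gtk-home").insert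
    "go-previous" "gtk-go-back").insert
    "go-next" "gtk-go-forward").insert
    "view-refresh" "gtk-refresh").insert
    "edit-undo" "gtk-undo").insert
    "dialog-information" "gtk-info").insert
    "dialog-warning" "gtk-warning").insert
    "dialog-error" "gtk-error"

-- ===== PORT A =====
-- body of A's `for index, char in enumerate(normalized)` loop
def pvCamelStep (normalized : List Char) (parts : List Char) (p : Int × Char) : List Char :=
  let index := p.1
  let char := p.2
  let parts :=
    if decide (index > 0) && PySem.Chars.isupper char &&
        -- index - 1 is in range whenever the short-circuited `index > 0` holds, so `.getD ' '` is exact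
        (PySem.Chars.islower ((PySem.List.pyGet? normalized (index - 1)).getD ' ') ||
          (decide (index + 1 < (normalized.length : Int)) &&
            PySem.Chars.islower ((PySem.List.pyGet? normalized (index + 1)).getD ' ')))
    then parts ++ ['-'] else parts
  parts ++ [PySem.Chars.lowerChar char]

def map_qt_icon_to_simplewx_icon_py (icon_name : String) : Option String :=
  let normalized := PySem.Chars.strip icon_name.toList
  let normalized :=
    if PySem.Chars.isIn "::".toList normalized then
      -- split("::") never returns an empty list, so the `[-1]` never raises and `.getD []` is exact
      (PySem.List.pyGet? (PySem.Chars.splitOn normalized "::".toList) (-1)).getD []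
    else normalized
  let normalized :=
    if decide (normalized ≠ []) && normalized.any PySem.Chars.isupper then
      (PySem.List.enumerate normalized).foldl (pvCamelStep normalized) []
    else normalized
  let normalized := PySem.Chars.lower (PySem.Chars.strip (PySem.Chars.replace normalized ['_'] ['-']))
  if normalized = [] then none
  else some (pvIconMap.getD (String.mk normalized) (String.mk normalized))

-- ===== PORT B =====
-- regex character classes [A-Z] / [a-z]
def pvUpperAZ (c : Char) : Bool := decide ('A' ≤ c) && decide (c ≤ 'Z')
def pvLowerAZ (c : Char) : Bool := decide ('a' ≤ c) && decide (c ≤ 'z')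

-- hand port of _BOUNDARY.sub("-", ·) for the zero-width pattern
-- r"(?<=[a-z])(?=[A-Z])|(?<=[\s\S])(?=[A-Z][a-z])": scan every position carrying the previous
-- character; insert '-' where one alternative matches; exact for this pattern (each position
-- hosts at most one empty match)
-- lookbehind (?<=[a-z]) on the previous character (none at the start of the string)
def pvPrevLow : Option Char → Bool
  | some p => pvLowerAZ p
  | none => false

-- lookahead [a-z] on the next character, if any
def pvLookLow : List Char → Bool
  | d :: _ => pvLowerAZ d
  | [] => false

def pvBoundarySub (prev : Option Char) : List Char → List Char
  | [] => []
  | c :: rest =>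
    let m1 := pvPrevLow prev && pvUpperAZ c
    let m2 := prev.isSome && pvUpperAZ c && pvLookLow rest
    if m1 || m2 then '-' :: c :: pvBoundarySub (some c) rest
    else c :: pvBoundarySub (some c) rest

def map_qt_icon_to_simplewx_icon_py_alt (icon_name : String) : Option String :=
  -- split("::") never returns an empty list, so the `[-1]` never raises and `.getD []` is exact
  let name := (PySem.List.pyGet? (PySem.Chars.splitOn (PySem.Chars.strip icon_name.toList) "::".toList) (-1)).getD []
  let name := PySem.Chars.lower (PySem.Chars.strip (PySem.Chars.replace (pvBoundarySub none name) ['_'] ['-']))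
  if name = [] then none
  else some (pvIconMap.getD (String.mk name) (String.mk name))

-- ===== PRECONDITION & SPEC =====
def Spec_map_qt_icon_to_simplewx_icon_py (icon_name : String) (out : Option String) : Prop := out = map_qt_icon_to_simplewx_icon_py_alt icon_name
instance (icon_name : String) (out : Option String) : Decidable (Spec_map_qt_icon_to_simplewx_icon_py icon_name out) := by unfold Spec_map_qt_icon_to_simplewx_icon_py; infer_instance

-- ===== CLAIM (what is proved, stated in full; the proofs are below) =====
def Claim_equal_map_qt_icon_to_simplewx_icon_py : Prop := ∀ (icon_name : String), Dom_map_qt_icon_to_simplewx_icon_py icon_name → Spec_map_qt_icon_to_simplewx_icon_py icon_name (map_qt_icon_to_simplewx_icon_py icon_name)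

-- ===== LEMMAS AND PROOFS =====

theorem pvUpperAZ_eq : pvUpperAZ = PySem.Chars.isupper := rfl
theorem pvLowerAZ_eq : pvLowerAZ = PySem.Chars.islower := rfl

theorem pvBoundarySub_cons (prev : Option Char) (c : Char) (t : List Char) :
    pvBoundarySub prev (c :: t) =
      (if (pvPrevLow prev && pvUpperAZ c) || (prev.isSome && pvUpperAZ c && pvLookLow t)
       then '-' :: c :: pvBoundarySub (some c) t
       else c :: pvBoundarySub (some c) t) := rfl

theorem pv_char_le_iff (c d : Char) : c ≤ d ↔ c.toNat ≤ d.toNat :=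
  ⟨fun h => Fin.mk_le_mk.mp h, fun h => Char.le_def.mpr h⟩

theorem pv_isupper_toNat (c : Char) (h : PySem.Chars.isupper c = true) :
    65 ≤ c.toNat ∧ c.toNat ≤ 90 := by
  simp only [PySem.Chars.isupper, Bool.and_eq_true, decide_eq_true_eq, pv_char_le_iff] at h
  exact h

theorem pv_lowerChar_toNat (c : Char) (h : PySem.Chars.isupper c = true) :
    (PySem.Chars.lowerChar c).toNat = c.toNat + 32 := by
  obtain ⟨h1, h2⟩ := pv_isupper_toNat c h
  simp only [PySem.Chars.lowerChar, h, if_pos]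
  rw [Char.toNat_ofNat, if_pos (Or.inl (by omega))]

theorem pv_isspace_lowerChar (c : Char) :
    PySem.Chars.isspace (PySem.Chars.lowerChar c) = PySem.Chars.isspace c := by
  by_cases h : PySem.Chars.isupper c = true
  · obtain ⟨h1, h2⟩ := pv_isupper_toNat c h
    have ht := pv_lowerChar_toNat c h
    have e1 : PySem.Chars.isspace (PySem.Chars.lowerChar c) = false := by
      simp only [PySem.Chars.isspace, Bool.or_eq_false_iff, Bool.and_eq_false_iff,
        decide_eq_false_iff_not, ht]
      omega
    have e2 : PySem.Chars.isspace c = false := by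
      simp only [PySem.Chars.isspace, Bool.or_eq_false_iff, Bool.and_eq_false_iff,
        decide_eq_false_iff_not]
      omega
    rw [e1, e2]
  · have hc : PySem.Chars.isupper c = false := by simpa using h
    simp [PySem.Chars.lowerChar, hc]

theorem pv_lowerChar_eq_underscore (c : Char) :
    PySem.Chars.lowerChar c = '_' ↔ c = '_' := by
  by_cases h : PySem.Chars.isupper c = true
  · obtain ⟨h1, h2⟩ := pv_isupper_toNat c h
    have ht := pv_lowerChar_toNat c h
    apply iff_of_false
    · intro he
      have : ('_' : Char).toNat = c.toNat + 32 := by rw [← he, ht]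
      have h95 : ('_' : Char).toNat = 95 := rfl
      omega
    · intro he
      have : c.toNat = 95 := by rw [he]; rfl
      omega
  · have hc : PySem.Chars.isupper c = false := by simpa using h
    simp [PySem.Chars.lowerChar, hc]

theorem pv_lowerChar_not_upper (c : Char) :
    PySem.Chars.isupper (PySem.Chars.lowerChar c) = false := by
  by_cases h : PySem.Chars.isupper c = true
  · have ht := pv_lowerChar_toNat c h
    obtain ⟨h1, h2⟩ := pv_isupper_toNat c h
    have ha : ('A' : Char).toNat = 65 := rfl
    have hz : ('Z' : Char).toNat = 90 := rfl
    simp only [PySem.Chars.isupper, Bool.and_eq_false_iff, decide_eq_false_iff_not,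
      pv_char_le_iff, ht, ha, hz]
    omega
  · have hc : PySem.Chars.isupper c = false := by simpa using h
    simp [PySem.Chars.lowerChar, hc]

theorem pv_lowerChar_idem (c : Char) :
    PySem.Chars.lowerChar (PySem.Chars.lowerChar c) = PySem.Chars.lowerChar c := by
  have e : ∀ d, PySem.Chars.isupper d = false → PySem.Chars.lowerChar d = d := by
    intro d hd; simp [PySem.Chars.lowerChar, hd]
  exact e _ (pv_lowerChar_not_upper c)

theorem pv_lower_lower (z : List Char) :
    PySem.Chars.lower (PySem.Chars.lower z) = PySem.Chars.lower z := by
  simp only [PySem.Chars.lower, List.map_map]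
  exact List.map_congr_left (fun c _ => pv_lowerChar_idem c)

theorem pv_dropWhile_congr (l : List Char) (p q : Char → Bool) (h : ∀ c ∈ l, p c = q c) :
    l.dropWhile p = l.dropWhile q := by
  induction l with
  | nil => rfl
  | cons c t ih =>
    simp only [List.dropWhile_cons, h c (by simp)]
    split
    · exact ih (fun x hx => h x (by simp [hx]))
    · rfl

theorem pv_strip_lower (z : List Char) :
    PySem.Chars.strip (PySem.Chars.lower z) = PySem.Chars.lower (PySem.Chars.strip z) := by
  have hds : ∀ (l : List Char), (l.map PySem.Chars.lowerChar).dropWhile PySem.Chars.isspace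
      = (l.dropWhile PySem.Chars.isspace).map PySem.Chars.lowerChar := by
    intro l
    rw [List.dropWhile_map]
    congr 1
    exact pv_dropWhile_congr _ _ _
      (fun c _ => by simp only [Function.comp_apply]; exact pv_isspace_lowerChar c)
  simp only [PySem.Chars.strip, PySem.Chars.lstrip, PySem.Chars.rstrip, PySem.Chars.lower]
  rw [hds, ← List.map_reverse, hds, List.map_reverse]

theorem pv_replace_go_lower (fuel : Nat) (l acc : List Char) :
    PySem.Chars.replace.go ['_'] ['-'] fuel (PySem.Chars.lower l) (PySem.Chars.lower acc)
      = PySem.Chars.lower (PySem.Chars.replace.go ['_'] ['-'] fuel l acc) := by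
  induction fuel generalizing l acc with
  | zero =>
    simp [PySem.Chars.replace.go, PySem.Chars.lower]
  | succ n ih =>
    cases l with
    | nil => simp [PySem.Chars.replace.go, PySem.Chars.lower]
    | cons c t =>
      have hpre : List.isPrefixOf ['_'] (PySem.Chars.lowerChar c :: PySem.Chars.lower t)
          = List.isPrefixOf ['_'] (c :: t) := by
        have hx : ∀ (x : Char) (xs : List Char), List.isPrefixOf ['_'] (x :: xs) = ('_' == x) :=
          fun x xs => by simp [List.isPrefixOf]
        rw [hx, hx]
        by_cases hc : c = '_'
        · rw [hc, (pv_lowerChar_eq_underscore '_').mpr rfl]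
        · have h1 : PySem.Chars.lowerChar c ≠ '_' :=
            fun he => hc ((pv_lowerChar_eq_underscore c).mp he)
          simp [Ne.symm h1, Ne.symm hc]
      show PySem.Chars.replace.go ['_'] ['-'] (n+1)
          (PySem.Chars.lowerChar c :: PySem.Chars.lower t) (PySem.Chars.lower acc) = _
      rw [PySem.Chars.replace.go, PySem.Chars.replace.go, hpre]
      by_cases hp : List.isPrefixOf ['_'] (c :: t) = true
      · simp only [hp, if_pos]
        have : ('-' :: PySem.Chars.lower acc) = PySem.Chars.lower ('-' :: acc) := by
          simp [PySem.Chars.lower, show PySem.Chars.lowerChar '-' = '-' from by decide]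
        simp only [List.drop_succ_cons, List.drop_zero, List.reverse_singleton]
        calc PySem.Chars.replace.go ['_'] ['-'] n (PySem.Chars.lower t) ('-' :: PySem.Chars.lower acc)
            = PySem.Chars.replace.go ['_'] ['-'] n (PySem.Chars.lower t) (PySem.Chars.lower ('-' :: acc)) := by rw [this]
          _ = _ := ih t ('-' :: acc)
      · simp only [hp, if_neg, Bool.false_eq_true, not_false_eq_true]
        have : (PySem.Chars.lowerChar c :: PySem.Chars.lower acc) = PySem.Chars.lower (c :: acc) := by
          simp [PySem.Chars.lower]
        rw [this]
        exact ih t (c :: acc)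

theorem pv_replace_lower (y : List Char) :
    PySem.Chars.replace (PySem.Chars.lower y) ['_'] ['-']
      = PySem.Chars.lower (PySem.Chars.replace y ['_'] ['-']) := by
  simp only [PySem.Chars.replace, List.isEmpty_cons, Bool.false_eq_true, if_neg,
    not_false_eq_true]
  have hl : (PySem.Chars.lower y).length = y.length := List.length_map ..
  rw [hl]
  have := pv_replace_go_lower y.length y []
  simpa [PySem.Chars.lower] using this

-- the full tail pipeline of both programs ignores a pre-lowering of its input
theorem pv_tail_lower (y : List Char) :
    PySem.Chars.lower (PySem.Chars.strip (PySem.Chars.replace (PySem.Chars.lower y) ['_'] ['-']))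
      = PySem.Chars.lower (PySem.Chars.strip (PySem.Chars.replace y ['_'] ['-'])) := by
  rw [pv_replace_lower, pv_strip_lower, pv_lower_lower]

-- if sep occurs nowhere in l, splitOn.go returns the single remaining piece
theorem pv_splitOn_go_self (sep : List Char) (fuel : Nat) (l cur : List Char)
    (acc : List (List Char)) (hf : l.length ≤ fuel)
    (h : ∀ j, ¬ sep <+: l.drop j) :
    PySem.Chars.splitOn.go sep fuel l cur acc = ((cur.reverse ++ l) :: acc).reverse := by
  induction fuel generalizing l cur acc with
  | zero => rw [PySem.Chars.splitOn.go]
  | succ n ih =>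
    cases l with
    | nil =>
      rw [PySem.Chars.splitOn.go]
      · simp
      · omega
    | cons c t =>
      rw [PySem.Chars.splitOn.go]
      have hp : sep.isPrefixOf (c :: t) = false := by
        rw [← Bool.not_eq_true, List.isPrefixOf_iff_prefix]
        simpa using h 0
      rw [hp]
      simp only [Bool.false_eq_true, if_neg, not_false_eq_true]
      rw [ih t (c :: cur) acc (by simpa using Nat.le_of_succ_le_succ hf)
        (fun j => by simpa using h (j + 1))]
      simp

theorem pv_splitOn_self (cs sep : List Char) (hsep : sep ≠ [])
    (h : ¬ sep <:+: cs) : PySem.Chars.splitOn cs sep = [cs] := by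
  rw [PySem.Chars.splitOn, pv_splitOn_go_self sep (cs.length + 1) cs [] [] (by omega)]
  · simp
  · intro j hj
    exact h (hj.isInfix.trans (List.drop_suffix j cs).isInfix)

-- B's substitution is the identity on strings without an ASCII uppercase letter
theorem pv_boundarySub_no_upper (prev : Option Char) (ns : List Char)
    (h : ns.any PySem.Chars.isupper = false) : pvBoundarySub prev ns = ns := by
  induction ns generalizing prev with
  | nil => rfl
  | cons c t ih =>
    simp only [List.any_cons, Bool.or_eq_false_iff] at h
    have hu : pvUpperAZ c = false := by rw [pvUpperAZ_eq]; exact h.1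
    rw [pvBoundarySub_cons]
    simp only [hu, Bool.and_false, Bool.false_and, Bool.false_or, Bool.or_self,
      Bool.false_eq_true, if_neg, not_false_eq_true]
    rw [ih (some c) h.2]

-- A's CamelCase loop computes the lowercasing of B's substitution
theorem pv_loop_eq (ns : List Char) (t : List Char) :
    ∀ (k : Nat) (acc : List Char), ns.drop k = t →
    (PySem.List.enumerate t (k : Int)).foldl (pvCamelStep ns) acc
      = acc ++ PySem.Chars.lower
          (pvBoundarySub (if k = 0 then none else ns[k-1]?) t) := by
  induction t with
  | nil => intro k acc _; simp [PySem.List.enumerate, PySem.Chars.lower, pvBoundarySub]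
  | cons c rest ih =>
    intro k acc hdrop
    have hk : k < ns.length := by
      have := congrArg List.length hdrop
      simp at this; omega
    have hck : ns[k]? = some c := by
      have h0 : (ns.drop k)[0]? = ns[k+0]? := List.getElem?_drop
      rw [hdrop] at h0; simpa using h0.symm
    have hrest : ns.drop (k+1) = rest := by
      have := congrArg List.tail hdrop
      simpa [List.tail_drop] using this
    -- A's `index + 1 < len and normalized[index+1].islower()` test is B's lookahead
    have hnext : (decide ((k : Int) + 1 < (ns.length : Int)) &&
          PySem.Chars.islower ((PySem.List.pyGet? ns ((k : Int) + 1)).getD ' '))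
        = pvLookLow rest := by
      cases rest with
      | nil =>
        have hlen : ns.length = k + 1 := by
          have := congrArg List.length hdrop
          simp at this; omega
        simp [hlen, pvLookLow]
      | cons d rest' =>
        have hlen : k + 1 < ns.length := by
          have := congrArg List.length hdrop
          simp at this; omega
        have hd : ns[k+1]? = some d := by
          have h0 : (ns.drop (k+1))[0]? = ns[(k+1)+0]? := List.getElem?_drop
          rw [hrest] at h0; simpa using h0.symm
        have hcast : (k : Int) + 1 = ((k + 1 : Nat) : Int) := by push_cast; ring
        have hlt : ((k : Int) + 1) < (ns.length : Int) := by omega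
        simp only [hcast, PySem.List.pyGet?_natCast, hd, Option.getD_some, pvLookLow,
          pvLowerAZ_eq]
        simp [← hcast, hlt]
    have hstep : pvCamelStep ns acc ((k : Int), c)
        = acc ++ (if (pvPrevLow (if k = 0 then none else ns[k-1]?) && pvUpperAZ c) ||
              ((if k = 0 then none else ns[k-1]?).isSome && pvUpperAZ c && pvLookLow rest)
            then ['-', PySem.Chars.lowerChar c] else [PySem.Chars.lowerChar c]) := by
      cases k with
      | zero => simp [pvCamelStep, pvPrevLow]
      | succ j =>
        have hj : j < ns.length := by omega
        have hp : ns[j]? = some (ns[j]'hj) := List.getElem?_eq_getElem hj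
        have hc1 : decide (((j+1 : Nat) : Int) > 0) = true := by simp
        have hcast1 : ((j+1 : Nat) : Int) - 1 = ((j : Nat) : Int) := by push_cast; ring
        rw [pvCamelStep]
        simp only [hcast1, PySem.List.pyGet?_natCast, hp, hnext, hc1, Option.getD_some,
          pvUpperAZ_eq, Bool.true_and]
        simp only [Nat.add_sub_cancel, hp, Nat.succ_ne_zero, Option.isSome_some,
          Bool.true_and, reduceIte, pvPrevLow, pvLowerAZ_eq]
        cases PySem.Chars.isupper c <;>
          cases PySem.Chars.islower (ns[j]'hj) <;>
            cases pvLookLow rest <;> simp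
    have henum : PySem.List.enumerate (c :: rest) (k : Int)
        = ((k : Int), c) :: PySem.List.enumerate rest ((k : Int) + 1) := rfl
    rw [henum, List.foldl_cons, hstep]
    have hcast : (k : Int) + 1 = ((k + 1 : Nat) : Int) := by push_cast; ring
    rw [hcast, ih (k+1) _ hrest]
    rw [pvBoundarySub_cons]
    have hprev1 : (if k + 1 = 0 then none else ns[k+1-1]?) = some c := by simpa using hck
    rw [hprev1]
    by_cases hcond : ((pvPrevLow (if k = 0 then none else ns[k-1]?) && pvUpperAZ c) ||
        ((if k = 0 then none else ns[k-1]?).isSome && pvUpperAZ c && pvLookLow rest)) = true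
    · rw [if_pos hcond, if_pos hcond]
      simp [PySem.Chars.lower, show PySem.Chars.lowerChar '-' = '-' from by decide]
    · rw [if_neg hcond, if_neg hcond]
      simp [PySem.Chars.lower]

theorem pv_camel_eq (ns : List Char) :
    (PySem.List.enumerate ns).foldl (pvCamelStep ns) []
      = PySem.Chars.lower (pvBoundarySub none ns) := by
  have := pv_loop_eq ns ns 0 [] (by simp)
  simpa using this

-- ===== VERDICT (by name: the statement is the Claim_ definition above) =====
theorem map_qt_icon_to_simplewx_icon_py_spec : Claim_equal_map_qt_icon_to_simplewx_icon_py := by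
  intro s _
  unfold Spec_map_qt_icon_to_simplewx_icon_py
  simp only [map_qt_icon_to_simplewx_icon_py, map_qt_icon_to_simplewx_icon_py_alt]
  set cs := PySem.Chars.strip s.toList with hcs
  have hsplit : (if PySem.Chars.isIn "::".toList cs then
        (PySem.List.pyGet? (PySem.Chars.splitOn cs "::".toList) (-1)).getD []
      else cs)
      = (PySem.List.pyGet? (PySem.Chars.splitOn cs "::".toList) (-1)).getD [] := by
    by_cases hin : PySem.Chars.isIn "::".toList cs = true
    · rw [if_pos hin]
    · have hnin : ¬ "::".toList <:+: cs :=
        (PySem.Chars.isIn_eq_false_iff "::".toList cs).mp (by simpa using hin)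
      rw [if_neg (by simpa using hin), pv_splitOn_self cs "::".toList (by decide) hnin]
      simp [PySem.List.pyGet?, PySem.List.pyIdx?]
  rw [hsplit]
  set ns := (PySem.List.pyGet? (PySem.Chars.splitOn cs "::".toList) (-1)).getD [] with hns
  by_cases hguard : (decide (ns ≠ []) && ns.any PySem.Chars.isupper) = true
  · rw [if_pos hguard, pv_camel_eq, pv_tail_lower]
  · rw [if_neg hguard]
    have : pvBoundarySub none ns = ns := by
      rcases Bool.and_eq_false_iff.mp (Bool.eq_false_iff.mpr hguard) with h | h
      · have : ns = [] := by simpa using h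
        rw [this]; rfl
      · exact pv_boundarySub_no_upper none ns h
    rw [this]
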